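-- pv_equiv track=rewrite | github.com/anuarovanazerke/ADS-labs | Lab1.py | nearest_not_greater
-- ===== SOURCE A (Python) =====
-- def nearest_not_greater(arr):
--     stack = []
--     res = []
--     for x in arr:
--         while stack and stack[-1] > x:
--             stack.pop()
--         if stack:
--             res.append(stack[-1])
--         else:
--             res.append(-1)
--         stack.append(x)
--     return res
-- ===== SOURCE B (Python) =====
-- def nearest_not_greater(arr):
--     res = []
--     for i, x in enumerate(arr):
--         val = -1
--         for j in range(i - 1, -1, -1):
--             if arr[j] <= x:
--                 val = arr[j]
--                 break
--         res.append(val)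
--     return res
-- ===== Notes on version B (the rewrite author's own statement) =====
-- stated objective: alternative
-- what changed: Replaced the single-pass monotonic stack with a stackless brute-force: each element's answer is found by a fresh backward scan for the first earlier element <= it.
import Mathlib
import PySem

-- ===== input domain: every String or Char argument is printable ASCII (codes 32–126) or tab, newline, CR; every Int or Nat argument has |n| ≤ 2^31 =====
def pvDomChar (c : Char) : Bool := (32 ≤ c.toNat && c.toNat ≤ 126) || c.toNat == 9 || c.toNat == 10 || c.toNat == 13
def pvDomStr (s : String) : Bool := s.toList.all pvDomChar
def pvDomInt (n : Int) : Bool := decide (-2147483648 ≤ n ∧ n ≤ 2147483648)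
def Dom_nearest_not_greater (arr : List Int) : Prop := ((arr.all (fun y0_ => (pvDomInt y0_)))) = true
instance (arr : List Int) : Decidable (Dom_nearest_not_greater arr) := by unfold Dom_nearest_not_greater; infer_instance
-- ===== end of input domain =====

-- B replaces A's monotonic stack with a stackless brute-force backward scan per element (alternative decomposition, same return values).


-- ===== PORT A =====
-- stack is kept top-first; the `while stack and stack[-1] > x: stack.pop()` loop:
def nngPop (x : Int) : List Int → List Int
  | [] => []
  | t :: rest => if t > x then nngPop x rest else t :: rest

-- the `for x in arr` loop, carrying the stack; emits stack[-1] or -1, then pushes x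
def nngGo (stack : List Int) : List Int → List Int
  | [] => []
  | x :: xs =>
    let s := nngPop x stack
    (match s with | [] => -1 | t :: _ => t) :: nngGo (x :: s) xs

def nearest_not_greater (arr : List Int) : List Int := nngGo [] arr

-- ===== PORT B =====
-- the inner `for j in range(i-1, -1, -1)` backward scan: prev holds arr[:i] most-recent-first
def nngFindPrev (prev : List Int) (x : Int) : Int :=
  match prev with
  | [] => -1
  | y :: ys => if y ≤ x then y else nngFindPrev ys x

-- the outer loop over i, accumulating the reversed prefix
def nngAltGo (prev : List Int) : List Int → List Int
  | [] => []
  | x :: xs => nngFindPrev prev x :: nngAltGo (x :: prev) xs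

def nearest_not_greater_alt (arr : List Int) : List Int := nngAltGo [] arr

-- ===== PRECONDITION & SPEC =====
def Spec_nearest_not_greater (arr : List Int) (out : List Int) : Prop := out = nearest_not_greater_alt arr
instance (arr : List Int) (out : List Int) : Decidable (Spec_nearest_not_greater arr out) := by unfold Spec_nearest_not_greater; infer_instance

-- ===== CLAIM (what is proved, stated in full; the proofs are below) =====
def Claim_equal_nearest_not_greater : Prop := ∀ (arr : List Int), Dom_nearest_not_greater arr → Spec_nearest_not_greater arr (nearest_not_greater arr)

-- ===== LEMMAS AND PROOFS =====

-- the stack A holds after processing the (reversed) prefix `prev`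
def nngStackOf : List Int → List Int
  | [] => []
  | y :: ys => y :: nngPop y (nngStackOf ys)

lemma nngPop_pop (x y : Int) (hxy : x ≤ y) (s : List Int) :
    nngPop x (nngPop y s) = nngPop x s := by
  induction s with
  | nil => rfl
  | cons t rest ih =>
    by_cases hty : t > y
    · have htx : t > x := lt_of_le_of_lt hxy hty
      simp [nngPop, hty, htx, ih]
    · simp [nngPop, hty]

lemma nngFindPrev_eq_stack (prev : List Int) (x : Int) :
    nngFindPrev prev x =
      (match nngPop x (nngStackOf prev) with | [] => -1 | t :: _ => t) := by
  induction prev with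
  | nil => rfl
  | cons y ys ih =>
    by_cases hyx : y ≤ x
    · have : ¬ (y > x) := not_lt.mpr hyx
      simp [nngFindPrev, nngStackOf, nngPop, hyx, this]
    · have hgt : y > x := lt_of_not_ge hyx
      have hxy : x ≤ y := le_of_lt hgt
      simp [nngFindPrev, nngStackOf, nngPop, hyx, hgt, nngPop_pop x y hxy, ih]

lemma nngGo_eq_altGo (xs : List Int) : ∀ (prev : List Int),
    nngGo (nngStackOf prev) xs = nngAltGo prev xs := by
  induction xs with
  | nil => intro prev; rfl
  | cons x rest ih =>
    intro prev
    have hstack : x :: nngPop x (nngStackOf prev) = nngStackOf (x :: prev) := rfl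
    simp [nngGo, nngAltGo, nngFindPrev_eq_stack, hstack, ih (x :: prev)]

-- ===== VERDICT (by name: the statement is the Claim_ definition above) =====
theorem nearest_not_greater_spec : Claim_equal_nearest_not_greater := by
  intro arr _
  unfold Spec_nearest_not_greater nearest_not_greater nearest_not_greater_alt
  exact nngGo_eq_altGo arr []
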